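-- pv_equiv track=rewrite | github.com/Ronald-ssema/qr-ronald | qr_ronald/encoding.py | encode_byte_mode_v1_l
-- ===== SOURCE A (Python) =====
-- from typing import List
--
-- MAX_DATA_CODEWORDS_V1_L = 19      # 19 data codewords
--
-- MAX_DATA_BITS_V1_L = MAX_DATA_CODEWORDS_V1_L * 8  # 152 bits
--
-- def _to_bits(value: int, bit_count: int) -> str:
--     """Return bit_count-bit binary string for non-negative integer."""
--     if value < 0:
--         raise ValueError("value must be non-negative")
--     return format(value, f"0{bit_count}b")
--
-- def encode_byte_mode_v1_l(text: str) -> List[int]: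
--     """
--     Encode text into QR Version 1, ECC Level L, Byte mode *data codewords*.
--
--     Steps:
--       1. Encode text to ISO-8859-1 bytes.
--       2. Build bitstring: 4-bit mode + 8-bit length + 8 bits per byte.
--       3. Add terminator bits (up to 4 zeros) without exceeding 152 bits.
--       4. Pad with zeros to make length a multiple of 8.
--       5. Split into 8-bit bytes -> initial data codewords.
--       6. If fewer than 19 CW, pad with 0xEC, 0x11 alternating.
--     """
--     # 1) bytes
--     data_bytes = text.encode("iso-8859-1", errors="replace")
--     if len(data_bytes) > 17:
--         raise ValueError("Version 1-L Byte mode can hold at most 17 bytes")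
--
--     # 2) build bitstring
--     bits = ""
--     bits += "0100"                       # Byte mode indicator
--     bits += _to_bits(len(data_bytes), 8) # length in 8 bits
--
--     for b in data_bytes:
--         bits += _to_bits(b, 8)
--
--     # 3) terminator (up to 4 zeros)
--     remaining = MAX_DATA_BITS_V1_L - len(bits)
--     if remaining >= 4:
--         bits += "0000"
--     elif remaining > 0:
--         bits += "0" * remaining
--
--     # 4) pad to multiple of 8
--     if len(bits) % 8 != 0:
--         bits += "0" * (8 - len(bits) % 8)
--
--     # 5) split into 8-bit bytes
--     codewords = [int(bits[i:i+8], 2) for i in range(0, len(bits), 8)]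
--
--     # 6) pad with 0xEC, 0x11 alternating
--     pad_bytes = [0xEC, 0x11]
--     idx = 0
--     while len(codewords) < MAX_DATA_CODEWORDS_V1_L:
--         codewords.append(pad_bytes[idx % 2])
--         idx += 1
--
--     return codewords
-- ===== SOURCE B (Python) =====
-- from typing import List
--
-- def encode_byte_mode_v1_l(text: str) -> List[int]:
--     """Compute the 19 data codewords directly by nibble arithmetic, no bit string."""
--     data = text.encode("iso-8859-1", errors="replace")
--     n = len(data)
--     if n > 17:
--         raise ValueError("Version 1-L Byte mode can hold at most 17 bytes")
--     codewords = [0x40 + n // 16]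
--     prev = n % 16
--     for b in data:
--         codewords.append(prev * 16 + b // 16)
--         prev = b % 16
--     codewords.append(prev * 16)  # last nibble + 4-bit terminator
--     codewords += [(0xEC, 0x11)[i % 2] for i in range(19 - len(codewords))]
--     return codewords
-- ===== Notes on version B (the rewrite author's own statement) =====
-- stated objective: simpler
-- what changed: B never builds a binary bit string: it emits each codeword directly by nibble arithmetic (carrying the pending low nibble of the previous byte) and appends the 0xEC/0x11 padding with a comprehension instead of a while loop.
import Mathlib
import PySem

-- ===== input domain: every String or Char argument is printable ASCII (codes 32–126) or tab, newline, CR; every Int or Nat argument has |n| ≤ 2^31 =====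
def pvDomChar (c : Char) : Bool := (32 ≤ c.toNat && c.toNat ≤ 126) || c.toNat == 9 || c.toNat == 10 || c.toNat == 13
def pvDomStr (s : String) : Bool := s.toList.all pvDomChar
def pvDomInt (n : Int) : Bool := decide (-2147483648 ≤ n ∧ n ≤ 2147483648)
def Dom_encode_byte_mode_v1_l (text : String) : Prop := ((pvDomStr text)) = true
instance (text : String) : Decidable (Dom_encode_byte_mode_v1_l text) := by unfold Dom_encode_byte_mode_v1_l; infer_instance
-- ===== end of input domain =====

-- B computes the 19 data codewords directly by nibble arithmetic instead of building
-- and re-parsing a binary bit string (objective: simpler).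

-- ===== PORT A =====

-- _to_bits: format(value, f"0{bit_count}b") — minimal binary digits left-padded with '0'.
-- (value < 0 raises ValueError in Python; the function is only called on lengths and
-- byte values, which are non-negative, so that branch is unreachable here.)
def toBitsA (value : Int) (bitCount : Nat) : List Char :=
  let digits := Nat.toDigits 2 value.toNat
  List.replicate (bitCount - digits.length) '0' ++ digits

-- the comprehension [int(bits[i:i+8], 2) for i in range(0, len(bits), 8)]:
-- bits[i:i+8] is take 8 of drop i, so stepping by 8 is this structural recursion.
-- int(s, 2) is PySem.Int.ofCharsBase?; every chunk is a nonempty string of binary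
-- digits, so the ValueError case (none) is unreachable and .getD 0 is exact.
def chunksA : List Char → List Int
  | [] => []
  | c :: rest =>
    (PySem.Int.ofCharsBase? ((c :: rest).take 8) 2).getD 0 :: chunksA ((c :: rest).drop 8)
termination_by l => l.length
decreasing_by simp

-- the while-loop padding with pad_bytes[idx % 2]; the index is always 0 or 1, in range.
def padA (cw : List Int) (idx : Nat) : List Int :=
  if cw.length < 19 then
    padA (cw ++ [if idx % 2 = 0 then (0xEC : Int) else 0x11]) (idx + 1)
  else cw
termination_by 19 - cw.length
decreasing_by simp; omega

def encode_byte_mode_v1_l (text : String) : List Int :=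
  -- text.encode('iso-8859-1', 'replace'): the byte value of each char; exact for chars < 256
  -- (Dom restricts to ASCII, so the 'replace' path is never taken).
  let data : List Int := text.toList.map (fun c => (c.toNat : Int))
  -- len(data_bytes) > 17 raises ValueError: excluded by Pre_.
  let bits : List Char := ['0', '1', '0', '0'] ++ toBitsA (data.length : Int) 8
  let bits := data.foldl (fun acc b => acc ++ toBitsA b 8) bits
  let remaining : Int := 152 - (bits.length : Int)
  let bits := if remaining ≥ 4 then bits ++ ['0', '0', '0', '0']
              else if remaining > 0 then bits ++ List.replicate remaining.toNat '0'
              else bits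
  let bits := if bits.length % 8 ≠ 0 then bits ++ List.replicate (8 - bits.length % 8) '0'
              else bits
  padA (chunksA bits) 0

-- ===== PORT B =====

-- the for-loop over data plus the final append of the closing nibble codeword.
def nibblesB (prev : Int) : List Int → List Int
  | [] => [prev * 16]
  | b :: rest => (prev * 16 + PySem.Int.floordiv b 16) :: nibblesB (PySem.Int.mod b 16) rest

def encode_byte_mode_v1_l_alt (text : String) : List Int :=
  let data : List Int := text.toList.map (fun c => (c.toNat : Int))
  let n : Int := (data.length : Int)
  let cw : List Int := (0x40 + PySem.Int.floordiv n 16) :: nibblesB (PySem.Int.mod n 16) data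
  -- (0xEC, 0x11)[i % 2] for i in range(19 - len(cw))
  cw ++ (PySem.List.pyRange 0 (19 - (cw.length : Int))).map
          (fun i => if PySem.Int.mod i 2 = 0 then (0xEC : Int) else 0x11)

-- ===== PRECONDITION & SPEC =====
-- A raises ValueError when the encoded text is longer than 17 bytes.
def Pre_encode_byte_mode_v1_l (text : String) : Prop := text.toList.length ≤ 17
instance (text : String) : Decidable (Pre_encode_byte_mode_v1_l text) := by
  unfold Pre_encode_byte_mode_v1_l; infer_instance

def pvWitness_encode_byte_mode_v1_l : String := "Hi!"

def Spec_encode_byte_mode_v1_l (text : String) (out : List Int) : Prop := out = encode_byte_mode_v1_l_alt text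
instance (text : String) (out : List Int) : Decidable (Spec_encode_byte_mode_v1_l text out) := by unfold Spec_encode_byte_mode_v1_l; infer_instance

-- ===== CLAIM (what is proved, stated in full; the proofs are below) =====
def Claim_equal_encode_byte_mode_v1_l : Prop := ∀ (text : String), Dom_encode_byte_mode_v1_l text → Pre_encode_byte_mode_v1_l text → Spec_encode_byte_mode_v1_l text (encode_byte_mode_v1_l text)

-- ===== LEMMAS AND PROOFS =====

-- the four bits of a nibble, most significant first
def pvBits4 (p : Nat) : List Char :=
  [if p.testBit 3 then '1' else '0', if p.testBit 2 then '1' else '0',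
   if p.testBit 1 then '1' else '0', if p.testBit 0 then '1' else '0']

lemma pvLen_bits4 (p : Nat) : (pvBits4 p).length = 4 := by simp [pvBits4]

set_option maxRecDepth 8192 in
lemma pvToBits_split : ∀ b : Nat, b < 256 →
    toBitsA (b : Int) 8 = pvBits4 (b / 16) ++ pvBits4 (b % 16) := by decide

set_option maxRecDepth 8192 in
lemma pvParse4 : ∀ p < 16, ∀ q < 16,
    (PySem.Int.ofCharsBase? (pvBits4 p ++ pvBits4 q) 2).getD 0 = ((16 * p + q : Nat) : Int) := by
  decide

lemma pvCast_div16 (m : Nat) : ((m / 16 : Nat) : Int) = PySem.Int.floordiv (m : Int) 16 := by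
  have := PySem.Int.floordiv_natCast m 16; exact_mod_cast this.symm

lemma pvCast_mod16 (m : Nat) : ((m % 16 : Nat) : Int) = PySem.Int.mod (m : Int) 16 := by
  have := PySem.Int.mod_natCast m 16; exact_mod_cast this.symm

lemma pvChunksA_append (l1 l2 : List Char) (h : l1.length = 8) :
    chunksA (l1 ++ l2) = (PySem.Int.ofCharsBase? l1 2).getD 0 :: chunksA l2 := by
  have h1 : (l1 ++ l2).take 8 = l1 := List.take_left' h
  have h2 : (l1 ++ l2).drop 8 = l2 := List.drop_left' h
  cases l1 with
  | nil => simp at h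
  | cons c rest =>
    rw [List.cons_append, chunksA, ← List.cons_append, h1, h2]

lemma pvChunksA_step (p q : Nat) (hp : p < 16) (hq : q < 16) (l : List Char) :
    chunksA (pvBits4 p ++ pvBits4 q ++ l) = ((16 * p + q : Nat) : Int) :: chunksA l := by
  rw [List.append_assoc, ← List.append_assoc (pvBits4 p),
      pvChunksA_append _ _ (by simp [pvLen_bits4]), pvParse4 p hp q hq]

lemma pvFlat_len (bytes : List Nat) (hb : ∀ m ∈ bytes, m < 256) :
    (List.flatMap (fun m : Nat => toBitsA (m : Int) 8) bytes).length = 8 * bytes.length := by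
  induction bytes with
  | nil => simp
  | cons m rest ih =>
    rw [List.flatMap_cons, List.length_append, ih (fun x hx => hb x (by simp [hx])),
        pvToBits_split m (hb m (by simp))]
    simp [pvLen_bits4]
    ring

lemma pvChunks_nibbles (bytes : List Nat) (hb : ∀ m ∈ bytes, m < 256) :
    ∀ p : Nat, p < 16 →
    chunksA (pvBits4 p ++ (List.flatMap (fun m : Nat => toBitsA (m : Int) 8) bytes ++ pvBits4 0))
      = nibblesB (p : Int) (bytes.map (fun m : Nat => (m : Int))) := by
  induction bytes with
  | nil =>
    intro p hp
    have h := pvChunksA_step p 0 hp (by omega) []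
    rw [List.append_nil] at h
    rw [List.flatMap_nil, List.nil_append, List.map_nil, h, chunksA, nibblesB]
    push_cast
    ring_nf
  | cons m rest ih =>
    intro p hp
    have hm := hb m (by simp)
    have hrest : ∀ x ∈ rest, x < 256 := fun x hx => hb x (by simp [hx])
    rw [List.flatMap_cons, pvToBits_split m hm]
    have hassoc :
        pvBits4 p ++ (pvBits4 (m / 16) ++ pvBits4 (m % 16) ++
            List.flatMap (fun m : Nat => toBitsA (m : Int) 8) rest ++ pvBits4 0)
          = pvBits4 p ++ pvBits4 (m / 16) ++
            (pvBits4 (m % 16) ++ (List.flatMap (fun m : Nat => toBitsA (m : Int) 8) rest ++ pvBits4 0)) := by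
      simp [List.append_assoc]
    rw [hassoc, pvChunksA_step p (m / 16) hp (by omega),
        ih hrest (m % 16) (by omega)]
    simp only [List.map_cons, nibblesB]
    rw [← pvCast_div16, ← pvCast_mod16]
    congr 1
    push_cast
    ring

lemma pvPadA_eq : ∀ (k : Nat) (cw : List Int) (idx : Nat), cw.length + k = 19 →
    padA cw idx = cw ++ (List.range k).map
      (fun i => if (idx + i) % 2 = 0 then (0xEC : Int) else 0x11) := by
  intro k
  induction k with
  | zero =>
    intro cw idx h
    rw [padA]
    simp [show ¬ cw.length < 19 by omega]
  | succ k ih =>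
    intro cw idx h
    rw [padA]
    simp only [show cw.length < 19 by omega, if_pos]
    rw [ih _ (idx + 1) (by simp; omega)]
    rw [List.range_succ_eq_map, List.map_cons, List.map_map]
    simp only [List.append_assoc, List.singleton_append, Nat.add_zero]
    congr 2
    apply List.map_congr_left
    intro i _
    simp only [Function.comp]
    congr 2
    omega

lemma pvNibbles_len (p : Int) (l : List Int) : (nibblesB p l).length = l.length + 1 := by
  induction l generalizing p with
  | nil => simp [nibblesB]
  | cons b rest ih => simp [nibblesB, ih]

-- ===== VERDICT (by name: the statement is the Claim_ definition above) =====
theorem encode_byte_mode_v1_l_spec : Claim_equal_encode_byte_mode_v1_l := by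
  intro text hdom hpre
  unfold Spec_encode_byte_mode_v1_l
  set cs := text.toList with hcs
  have hb : ∀ c ∈ cs, c.toNat < 256 := by
    intro c hc
    have := List.all_eq_true.mp hdom c hc
    simp only [pvDomChar, Bool.or_eq_true, Bool.and_eq_true, decide_eq_true_eq, beq_iff_eq] at this
    omega
  set bytes := cs.map Char.toNat with hbytes
  have hblt : ∀ m ∈ bytes, m < 256 := by
    intro m hm
    obtain ⟨c, hc, rfl⟩ := List.mem_map.mp hm
    exact hb c hc
  have hlen : bytes.length ≤ 17 := by simpa [hbytes] using hpre
  have hdata : cs.map (fun c => (c.toNat : Int)) = bytes.map (fun m : Nat => (m : Int)) := by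
    rw [hbytes, List.map_map]; rfl
  unfold encode_byte_mode_v1_l encode_byte_mode_v1_l_alt
  simp only [← hcs, hdata]
  have hnlen : (bytes.map (fun m : Nat => (m : Int))).length = bytes.length := by simp
  rw [PySem.List.foldl_append_eq_flatMap, List.flatMap_map, hnlen]
  have hflen : (List.flatMap (fun m : Nat => toBitsA (m : Int) 8) bytes).length
      = 8 * bytes.length := pvFlat_len bytes hblt
  have hn256 : bytes.length < 256 := by omega
  have htb : toBitsA (bytes.length : Int) 8
      = pvBits4 (bytes.length / 16) ++ pvBits4 (bytes.length % 16) :=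
    pvToBits_split bytes.length hn256
  have hlenbits :
      ((['0','1','0','0'] ++ toBitsA (bytes.length : Int) 8) ++
        List.flatMap (fun m : Nat => toBitsA (m : Int) 8) bytes).length
        = 12 + 8 * bytes.length := by
    simp only [List.length_append, hflen, htb, pvLen_bits4]
    simp
  rw [hlenbits]
  have hrem : (4 : Int) ≤ 152 - ((12 + 8 * bytes.length : Nat) : Int) := by push_cast; omega
  rw [if_pos hrem]
  have hlen2 : ((((['0','1','0','0'] ++ toBitsA (bytes.length : Int) 8) ++
        List.flatMap (fun m : Nat => toBitsA (m : Int) 8) bytes) ++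
        ['0','0','0','0']).length) % 8 = 0 := by
    simp only [List.length_append, hflen, htb, pvLen_bits4]
    simp
    omega
  rw [if_neg (by simp only [hlen2]; simp)]
  have hmode : (['0','1','0','0'] : List Char) = pvBits4 4 := by decide
  have hterm : (['0','0','0','0'] : List Char) = pvBits4 0 := by decide
  rw [htb, hmode, hterm]
  have hassoc :
      ((pvBits4 4 ++ (pvBits4 (bytes.length / 16) ++ pvBits4 (bytes.length % 16))) ++
        List.flatMap (fun m : Nat => toBitsA (m : Int) 8) bytes) ++ pvBits4 0
      = pvBits4 4 ++ pvBits4 (bytes.length / 16) ++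
        (pvBits4 (bytes.length % 16) ++
          (List.flatMap (fun m : Nat => toBitsA (m : Int) 8) bytes ++ pvBits4 0)) := by
    simp [List.append_assoc]
  rw [hassoc, pvChunksA_step 4 (bytes.length / 16) (by omega) (by omega),
      pvChunks_nibbles bytes hblt (bytes.length % 16) (by omega)]
  have hhead : ((16 * 4 + bytes.length / 16 : Nat) : Int)
      = 0x40 + PySem.Int.floordiv ((bytes.length : Nat) : Int) 16 := by
    rw [← pvCast_div16]; push_cast; ring
  rw [hhead, pvCast_mod16]
  set cw : List Int := (0x40 + PySem.Int.floordiv ((bytes.length : Nat) : Int) 16) ::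
      nibblesB (PySem.Int.mod ((bytes.length : Nat) : Int) 16)
        (bytes.map (fun m : Nat => (m : Int))) with hcw
  have hcwlen : cw.length = bytes.length + 2 := by
    simp [hcw, pvNibbles_len]
  have hk : (19 : Int) - (cw.length : Int) = ((17 - bytes.length : Nat) : Int) := by
    rw [hcwlen]; push_cast; omega
  rw [pvPadA_eq (17 - bytes.length) cw 0 (by omega), hk,
      PySem.List.pyRange_zero_natCast, List.map_map]
  congr 1
  apply List.map_congr_left
  intro i _
  simp only [Function.comp, Nat.zero_add]
  have hm2 : PySem.Int.mod ((i : Nat) : Int) 2 = ((i % 2 : Nat) : Int) := by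
    have := PySem.Int.mod_natCast i 2; exact_mod_cast this
  rw [hm2]
  rcases Nat.mod_two_eq_zero_or_one i with h | h <;> simp [h]
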